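-- pv_equiv track=rewrite | github.com/AdamZhouSE/pythonHomework | Code/CodeRecords/2443/60755/284917.py | solve
-- ===== SOURCE A (Python) =====
-- def solve(string, all, res):
--     for i in range(len(all)):
--         s = string + all[i]
--         temp = all.copy()
--         temp.remove(all[i])
--         solve(s, temp, res)
--     if len(all) == 0:
--         res.append(string)
--     return res
-- ===== SOURCE B (Python) =====
-- def solve(string, all, res):
--     # Iterative DFS with an explicit stack instead of recursion; same pre-order, same res mutation.
--     stack = [(string, all)]
--     while stack:
--         acc, remaining = stack.pop()
--         if len(remaining) == 0:
--             res.append(acc)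
--         else:
--             frames = []
--             for i in range(len(remaining)):
--                 s = acc + remaining[i]
--                 temp = remaining.copy()
--                 temp.remove(remaining[i])
--                 frames.append((s, temp))
--             for f in reversed(frames):
--                 stack.append(f)
--     return res
-- ===== Notes on version B (the rewrite author's own statement) =====
-- stated objective: alternative
-- what changed: Replaces the recursive permutation builder with an iterative depth-first search over an explicit stack of (accumulated string, remaining list) frames, pushing children in reverse so pre-order (and thus output order, including duplicate handling via copy+remove-by-value) is preserved.
import Mathlib
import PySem

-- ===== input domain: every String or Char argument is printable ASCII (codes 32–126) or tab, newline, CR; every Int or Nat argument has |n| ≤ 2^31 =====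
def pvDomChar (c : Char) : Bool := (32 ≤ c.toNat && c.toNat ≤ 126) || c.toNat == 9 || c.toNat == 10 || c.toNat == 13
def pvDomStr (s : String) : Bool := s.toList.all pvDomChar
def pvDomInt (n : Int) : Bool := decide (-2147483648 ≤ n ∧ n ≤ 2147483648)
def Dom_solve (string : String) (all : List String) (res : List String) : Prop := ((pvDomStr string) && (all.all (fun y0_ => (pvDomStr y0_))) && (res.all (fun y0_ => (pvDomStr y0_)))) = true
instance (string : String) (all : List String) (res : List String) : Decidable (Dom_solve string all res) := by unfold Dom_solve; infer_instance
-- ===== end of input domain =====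

-- B is an iterative explicit-stack DFS instead of A's recursion; both append the same
-- permutations to res in the same order (the in-place mutation of res is identical), 'alternative' objective.

-- ===== PORT A =====
-- A's recursion: the loop over i is the breadth recursion (i+1), the call solve(s, temp, res)
-- the depth recursion; the trailing 'if len(all) == 0: res.append(string)' is the i ≥ len case.
def solveA (string : String) (all : List String) (res : List String) (i : Nat) : List String :=
  if h : i < all.length then
    let a := all[i]
    match hr : PySem.List.remove? all a with
    | some temp =>
        solveA string all (solveA (string ++ a) temp res 0) (i + 1)
    | none => res   -- unreachable: all[i] ∈ all, so list.remove never raises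
  else
    if all.length = 0 then res ++ [string] else res
termination_by (all.length, all.length - i)
decreasing_by
  · refine Prod.Lex.left _ _ ?_
    have hm : a ∈ all := List.getElem_mem h
    rw [PySem.List.remove?_eq_some_erase _ _ hm] at hr
    cases hr
    have := List.length_erase_of_mem hm
    omega
  · exact Prod.Lex.right _ (by omega)

def solve (string : String) (all : List String) (res : List String) : List String :=
  solveA string all res 0

-- ===== PORT B =====
-- one child frame per index i: (acc + remaining[i], remaining.copy() with first remaining[i] removed)
def mkFrames (acc : String) (rem : List String) : List (String × List String) :=
  (List.range rem.length).map (fun i =>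
    let a := rem.getD i ""
    (acc ++ a, (PySem.List.remove? rem a).getD rem))

theorem mkFrames_snd_length (acc : String) (rem : List String) :
    ∀ f ∈ mkFrames acc rem, f.2.length + 1 = rem.length := by
  intro f hf
  simp only [mkFrames, List.mem_map, List.mem_range] at hf
  obtain ⟨i, hi, rfl⟩ := hf
  have hg : rem.getD i "" = rem[i] := List.getD_eq_getElem rem "" hi
  have hm : rem.getD i "" ∈ rem := by rw [hg]; exact List.getElem_mem hi
  simp only [PySem.List.remove?_eq_some_erase _ _ hm, Option.getD_some]
  have := List.length_erase_of_mem hm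
  have : 0 < rem.length := by omega
  simp_all
  omega

-- the explicit stack loop: pop a frame, emit if its remaining list is empty, else push its
-- children (in reverse in Python, hence in order at the front here)
def solveB (stack : List (String × List String)) (res : List String) : List String :=
  match stack with
  | [] => res
  | (acc, rem) :: stack' =>
    if rem.length = 0 then solveB stack' (res ++ [acc])
    else solveB (mkFrames acc rem ++ stack') res
termination_by (stack.map (fun f => Nat.factorial (f.2.length + 1))).sum
decreasing_by
  · have := Nat.factorial_pos (rem.length + 1)
    simp only [List.map_cons, List.sum_cons]
    omega
  · simp only [List.map_append, List.sum_append, List.map_cons, List.sum_cons]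
    have hlen : (mkFrames acc rem).length = rem.length := by simp [mkFrames]
    have hmap : (mkFrames acc rem).map (fun f => Nat.factorial (f.2.length + 1))
        = List.replicate rem.length (Nat.factorial rem.length) := by
      refine List.eq_replicate_iff.mpr ⟨by simpa using hlen, ?_⟩
      intro b hb
      simp only [List.mem_map] at hb
      obtain ⟨f, hf, rfl⟩ := hb
      have := mkFrames_snd_length acc rem f hf
      rw [this]
    rw [hmap, List.sum_replicate, smul_eq_mul]
    have h3 : rem.length * Nat.factorial rem.length
        < (rem.length + 1) * Nat.factorial rem.length :=
      Nat.mul_lt_mul_of_lt_of_le (by omega) (le_refl _) (Nat.factorial_pos _)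
    have h4 : Nat.factorial (rem.length + 1) = (rem.length + 1) * Nat.factorial rem.length :=
      rfl
    omega

def solve_alt (string : String) (all : List String) (res : List String) : List String :=
  solveB [(string, all)] res

-- ===== PRECONDITION & SPEC =====
def Spec_solve (string : String) (all : List String) (res : List String) (out : List String) : Prop := out = solve_alt string all res
instance (string : String) (all : List String) (res : List String) (out : List String) : Decidable (Spec_solve string all res out) := by unfold Spec_solve; infer_instance

-- ===== CLAIM (what is proved, stated in full; the proofs are below) =====
def Claim_equal_solve : Prop := ∀ (string : String) (all : List String) (res : List String), Dom_solve string all res → Spec_solve string all res (solve string all res)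

-- ===== LEMMAS AND PROOFS =====

-- A's loop from index i is a left fold of the depth call over the frames from index i on
theorem solveA_eq_fold (all : List String) : ∀ (k i : Nat), all.length - i ≤ k →
    ∀ (string : String) (res : List String),
    solveA string all res i =
      if all.length = 0 then res ++ [string]
      else ((mkFrames string all).drop i).foldl (fun r f => solveA f.1 f.2 r 0) res := by
  intro k
  induction k with
  | zero =>
    intro i hi string res
    have hle : all.length ≤ i := by omega
    rw [solveA]
    have hlt : ¬ i < all.length := by omega
    simp only [dif_neg hlt]
    have hdrop : (mkFrames string all).drop i = [] := by
      apply List.drop_eq_nil_of_le; simp [mkFrames]; omega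
    rw [hdrop]
    by_cases h0 : all.length = 0 <;> simp [h0]
  | succ k ih =>
    intro i hi string res
    by_cases hlt : i < all.length
    · rw [solveA]
      simp only [dif_pos hlt]
      have hm : all[i] ∈ all := List.getElem_mem hlt
      have hrem : PySem.List.remove? all all[i] = some (all.erase all[i]) :=
        PySem.List.remove?_eq_some_erase all all[i] hm
      have h0 : ¬ all.length = 0 := by omega
      split
      case h_2 heq => rw [hrem] at heq; exact absurd heq (by simp)
      case h_1 temp heq =>
      rw [hrem] at heq
      injection heq with heq
      subst heq
      have ihi := ih (i + 1) (by omega) string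
        (solveA (string ++ all[i]) (all.erase all[i]) res 0)
      rw [ihi]
      simp only [if_neg h0]
      have hidx : i < (mkFrames string all).length := by simp [mkFrames]; omega
      have hget : (mkFrames string all)[i] =
          (string ++ all[i], all.erase all[i]) := by
        simp only [mkFrames, List.getElem_map, List.getElem_range]
        have hg : all.getD i "" = all[i] := List.getD_eq_getElem all "" hlt
        rw [hg, PySem.List.remove?_eq_some_erase _ _ hm, Option.getD_some]
      rw [List.drop_eq_getElem_cons hidx, hget, List.foldl_cons]
    · rw [solveA]
      simp only [dif_neg hlt]
      have hdrop : (mkFrames string all).drop i = [] := by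
        apply List.drop_eq_nil_of_le; simp [mkFrames]; omega
      rw [hdrop]
      by_cases h0 : all.length = 0 <;> simp [h0]

-- pushing a block of frames = folding A's recursion over them before continuing with the stack
theorem solveB_frames (n : Nat)
    (H : ∀ (rem : List String), rem.length ≤ n → ∀ (acc : String)
      (stack : List (String × List String)) (res : List String),
      solveB ((acc, rem) :: stack) res = solveB stack (solveA acc rem res 0)) :
    ∀ (frames : List (String × List String)), (∀ f ∈ frames, f.2.length ≤ n) →
    ∀ (stack : List (String × List String)) (res : List String),
    solveB (frames ++ stack) res =
      solveB stack (frames.foldl (fun r f => solveA f.1 f.2 r 0) res) := by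
  intro frames
  induction frames with
  | nil => intro _ stack res; simp
  | cons f fs ihf =>
    intro hall stack res
    obtain ⟨a, r⟩ := f
    have h1 : r.length ≤ n := hall (a, r) (by simp)
    rw [List.cons_append, H r h1 a (fs ++ stack) res,
      ihf (fun g hg => hall g (by simp [hg])) stack, List.foldl_cons]

-- the main invariant: popping one frame behaves like one call of A's recursion
theorem solveB_main : ∀ (n : Nat) (rem : List String), rem.length ≤ n →
    ∀ (acc : String) (stack : List (String × List String)) (res : List String),
    solveB ((acc, rem) :: stack) res = solveB stack (solveA acc rem res 0) := by
  intro n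
  induction n with
  | zero =>
    intro rem hrem acc stack res
    have h0 : rem.length = 0 := by omega
    rw [solveB]
    simp only [if_pos h0]
    rw [solveA_eq_fold rem 0 0 (by omega), if_pos h0]
  | succ n ih =>
    intro rem hrem acc stack res
    by_cases h0 : rem.length = 0
    · rw [solveB]
      simp only [if_pos h0]
      rw [solveA_eq_fold rem 0 0 (by omega), if_pos h0]
    · rw [solveB]
      simp only [if_neg h0]
      have hfr : ∀ f ∈ mkFrames acc rem, f.2.length ≤ n := by
        intro f hf
        have := mkFrames_snd_length acc rem f hf
        omega
      rw [solveB_frames n ih (mkFrames acc rem) hfr stack res,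
        solveA_eq_fold rem rem.length 0 (by omega), if_neg h0, List.drop_zero]

-- ===== VERDICT (by name: the statement is the Claim_ definition above) =====
theorem solve_spec : Claim_equal_solve := by
  intro string all res _
  unfold Spec_solve solve solve_alt
  rw [solveB_main all.length all (le_refl _) string [] res]
  rw [solveB]
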